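-- pv_equiv track=rewrite | github.com/Abm32/anukriti_lite | src/benchmark/concordance.py | normalize_diplotype
-- ===== SOURCE A (Python) =====
-- def normalize_diplotype(diplotype: str) -> str:
--     """
--     Normalize diplotype for comparison.
--
--     Handles:
--     - Allele ordering (*2/*1 → *1/*2)
--     - Whitespace
--     - Bracket notation ([*6+*14] treated as single allele)
--     """
--     if not diplotype or diplotype.lower() in ("unknown", "no call", "n/a", ""):
--         return ""
--     d = diplotype.strip()
--     # Split on / but preserve bracket notation
--     parts = []
--     current = ""
--     depth = 0
--     for ch in d:
--         if ch == "[":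
--             depth += 1
--         elif ch == "]":
--             depth -= 1
--         if ch == "/" and depth == 0:
--             parts.append(current.strip())
--             current = ""
--         else:
--             current += ch
--     if current.strip():
--         parts.append(current.strip())
--     # Sort alleles lexicographically for consistent comparison
--     parts.sort()
--     return "/".join(parts)
-- ===== SOURCE B (Python) =====
-- def normalize_diplotype(diplotype: str) -> str:
--     """Normalize diplotype: find top-level '/' positions first, then slice/strip/sort."""
--     if not diplotype or diplotype.lower() in ("unknown", "no call", "n/a", ""):
--         return ""
--     d = diplotype.strip()
--     # pass 1: positions of every '/' at bracket depth 0
--     cuts = []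
--     depth = 0
--     for i, ch in enumerate(d):
--         if ch == "[":
--             depth += 1
--         elif ch == "]":
--             depth -= 1
--         if ch == "/" and depth == 0:
--             cuts.append(i)
--     # pass 2: slice between cut points; drop the trailing piece only if blank
--     parts = []
--     start = 0
--     for i in cuts:
--         parts.append(d[start:i].strip())
--         start = i + 1
--     tail = d[start:].strip()
--     if tail:
--         parts.append(tail)
--     parts.sort()
--     return "/".join(parts)
-- ===== Notes on version B (the rewrite author's own statement) =====
-- stated objective: alternative
-- what changed: A builds the allele segments character-by-character in one accumulator loop flushed at each top-level '/'; B is a staged algorithm: a first pass collects the integer indices of every depth-0 '/', a second pass slices the string between those indices, stripping each slice and keeping the trailing slice only if non-blank.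
import Mathlib
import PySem

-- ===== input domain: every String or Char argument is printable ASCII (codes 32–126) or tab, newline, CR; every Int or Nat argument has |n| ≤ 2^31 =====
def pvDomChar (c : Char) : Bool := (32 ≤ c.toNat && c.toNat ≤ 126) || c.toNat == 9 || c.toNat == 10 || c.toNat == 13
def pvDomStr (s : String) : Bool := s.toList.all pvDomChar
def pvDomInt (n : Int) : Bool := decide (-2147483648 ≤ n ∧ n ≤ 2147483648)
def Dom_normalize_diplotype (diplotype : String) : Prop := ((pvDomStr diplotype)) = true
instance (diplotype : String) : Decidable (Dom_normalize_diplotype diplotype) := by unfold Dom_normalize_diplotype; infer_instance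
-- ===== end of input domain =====

-- B replaces A's char-accumulating split loop by a staged algorithm: first collect the
-- indices of the top-level '/' separators, then slice the string at those indices;
-- objective: alternative decomposition, same cost.

-- ===== PORT A =====
-- A's for-loop with state (parts, current, depth); branches in source order.
def ndLoopA : List Char → List String → List Char → Int → List String × List Char
  | [], parts, current, _ => (parts, current)
  | c :: rest, parts, current, depth =>
    let depth := if c == '[' then depth + 1 else if c == ']' then depth - 1 else depth
    if c == '/' && depth == 0 then
      ndLoopA rest (parts ++ [String.mk (PySem.Chars.strip current)]) [] depth
    else
      ndLoopA rest parts (current ++ [c]) depth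

def normalize_diplotype (diplotype : String) : String :=
  let low := PySem.Str.lower diplotype
  if diplotype == "" || low == "unknown" || low == "no call" || low == "n/a" || low == "" then ""
  else
    let d := PySem.Str.strip diplotype
    let (parts, current) := ndLoopA d.toList [] [] 0
    let parts := if PySem.Chars.strip current ≠ [] then parts ++ [String.mk (PySem.Chars.strip current)] else parts
    PySem.Str.join "/" (PySem.List.sorted parts (fun x => x) false)

-- ===== PORT B =====
-- pass 1 of B: absolute positions (enumerate index i) of each depth-0 '/'
def ndCuts : List Char → Int → Int → List Int
  | [], _, _ => []
  | c :: rest, i, depth =>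
    let depth := if c == '[' then depth + 1 else if c == ']' then depth - 1 else depth
    if c == '/' && depth == 0 then i :: ndCuts rest (i + 1) depth
    else ndCuts rest (i + 1) depth

-- pass 2 of B: slice d between successive cut points; the trailing slice only if non-blank
def ndBuild (dl : List Char) : List Int → Int → List String
  | [], start =>
    let tail := PySem.Chars.strip (PySem.List.slice dl (some start) none)
    if tail ≠ [] then [String.mk tail] else []
  | i :: rest, start =>
    String.mk (PySem.Chars.strip (PySem.List.slice dl (some start) (some i))) :: ndBuild dl rest (i + 1)

def normalize_diplotype_alt (diplotype : String) : String :=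
  let low := PySem.Str.lower diplotype
  if diplotype == "" || low == "unknown" || low == "no call" || low == "n/a" || low == "" then ""
  else
    let d := PySem.Str.strip diplotype
    let parts := ndBuild d.toList (ndCuts d.toList 0 0) 0
    PySem.Str.join "/" (PySem.List.sorted parts (fun x => x) false)

-- ===== PRECONDITION & SPEC =====
def Spec_normalize_diplotype (diplotype : String) (out : String) : Prop := out = normalize_diplotype_alt diplotype
instance (diplotype : String) (out : String) : Decidable (Spec_normalize_diplotype diplotype out) := by unfold Spec_normalize_diplotype; infer_instance

-- ===== CLAIM (what is proved, stated in full; the proofs are below) =====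
def Claim_equal_normalize_diplotype : Prop := ∀ (diplotype : String), Dom_normalize_diplotype diplotype → Spec_normalize_diplotype diplotype (normalize_diplotype diplotype)

-- ===== LEMMAS AND PROOFS =====

-- canonical splitter: the raw (unstripped) segments between depth-0 '/' separators
def segsS : List Char → Int → List (List Char)
  | [], _ => [[]]
  | c :: rest, depth =>
    let depth := if c == '[' then depth + 1 else if c == ']' then depth - 1 else depth
    if c == '/' && depth == 0 then [] :: segsS rest depth
    else match segsS rest depth with
         | h :: t => (c :: h) :: t
         | [] => [[c]]

theorem segsS_ne_nil (l : List Char) (depth : Int) : segsS l depth ≠ [] := by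
  cases l with
  | nil => simp [segsS]
  | cons c r =>
    simp only [segsS]
    repeat' split
    all_goals simp

-- "strip each piece, drop a blank trailing piece" as a single recursion
def finishP : List (List Char) → List String
  | [] => []
  | [s] => if PySem.Chars.strip s ≠ [] then [String.mk (PySem.Chars.strip s)] else []
  | s :: s' :: t => String.mk (PySem.Chars.strip s) :: finishP (s' :: t)

-- nat-level form of B's slice sequence between cut points
def sliceSeq (dl : List Char) : List Int → Int → List (List Char)
  | [], start => [dl.drop start.toNat]
  | j :: rest, start => (dl.drop start.toNat).take (j.toNat - start.toNat) :: sliceSeq dl rest (j + 1)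

theorem sliceSeq_ne_nil (dl : List Char) (cuts : List Int) (start : Int) :
    sliceSeq dl cuts start ≠ [] := by
  cases cuts <;> simp [sliceSeq]

theorem ndCuts_ge (l : List Char) (i depth : Int) :
    ∀ j ∈ ndCuts l i depth, i ≤ j := by
  induction l generalizing i depth with
  | nil => simp [ndCuts]
  | cons c r ih =>
    intro j hj
    simp only [ndCuts] at hj
    repeat' split at hj
    all_goals
      first
        | (rcases List.mem_cons.mp hj with h | h
           · omega
           · have := ih _ _ j h; omega)
        | (have := ih _ _ j hj; omega)

theorem ndCuts_pairwise (l : List Char) (i depth : Int) :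
    List.Pairwise (· < ·) (ndCuts l i depth) := by
  induction l generalizing i depth with
  | nil => simp [ndCuts]
  | cons c r ih =>
    simp only [ndCuts]
    repeat' split
    all_goals
      first
        | exact ih _ _
        | (refine List.pairwise_cons.mpr ⟨fun j hj => ?_, ih _ _⟩
           have := ndCuts_ge r (i + 1) _ j hj; omega)

theorem ndBuild_eq (dl : List Char) (cuts : List Int) (start : Int)
    (hs : 0 ≤ start) (hc : ∀ j ∈ cuts, start ≤ j) (hp : List.Pairwise (· < ·) cuts) :
    ndBuild dl cuts start = finishP (sliceSeq dl cuts start) := by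
  induction cuts generalizing start with
  | nil =>
    simp only [ndBuild, sliceSeq, finishP]
    rw [PySem.List.slice_from _ hs]
  | cons j rest ih =>
    have hj : start ≤ j := hc j (by simp)
    have hj0 : 0 ≤ j := le_trans hs hj
    rcases List.pairwise_cons.mp hp with ⟨hhd, hp'⟩
    simp only [ndBuild, sliceSeq]
    rw [PySem.List.slice_toNat _ hs hj0]
    have hne := sliceSeq_ne_nil dl rest (j + 1)
    cases hsq : sliceSeq dl rest (j + 1) with
    | nil => exact absurd hsq hne
    | cons h t =>
      simp only [finishP]
      rw [ih (j + 1) (by omega) (fun k hk => by have := hhd k hk; omega) hp', hsq]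

theorem sliceSeq_eq_segsS (dl : List Char) (l : List Char) (start depth : Int)
    (hs : 0 ≤ start) (hd : dl.drop start.toNat = l) :
    sliceSeq dl (ndCuts l start depth) start = segsS l depth := by
  induction l generalizing start depth with
  | nil => simp [ndCuts, sliceSeq, segsS, hd]
  | cons c r ih =>
    have hd1 : dl.drop (start + 1).toNat = r := by
      have h1 : (start + 1).toNat = start.toNat + 1 := by omega
      rw [h1, ← List.drop_drop, hd]
      simp
    simp only [ndCuts, segsS]
    set D := (if c == '[' then depth + 1 else if c == ']' then depth - 1 else depth) with hD
    by_cases hsep : (c == '/' && D == 0) = true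
    · simp only [hsep, if_pos]
      simp only [sliceSeq, hd]
      rw [ih (start + 1) D (by omega) hd1]
      simp
    · simp only [hsep, Bool.false_eq_true, if_false]
      have hIH := ih (start + 1) D (by omega) hd1
      cases hcut : ndCuts r (start + 1) D with
      | nil =>
        rw [hcut] at hIH
        simp only [sliceSeq, hd1] at hIH
        rw [← hIH]
        simp [sliceSeq, hd]
      | cons j rest =>
        have hjb : start + 1 ≤ j := ndCuts_ge r (start + 1) D j (by rw [hcut]; simp)
        rw [hcut] at hIH
        cases hsg : segsS r D with
        | nil => exact absurd hsg (segsS_ne_nil r D)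
        | cons h t =>
          rw [hsg] at hIH
          simp only [sliceSeq, hd1] at hIH
          injection hIH with h1 h2
          simp only [sliceSeq, hd]
          rw [show j.toNat - start.toNat = (j.toNat - (start + 1).toNat) + 1 from by omega,
              List.take_succ_cons, h1, h2]

-- core invariant for A: the finished parts list equals finishP of (current glued onto) segsS
theorem loopA_eq (l : List Char) (parts : List String) (current : List Char) (depth : Int) :
    (let r := ndLoopA l parts current depth;
     if PySem.Chars.strip r.2 ≠ [] then r.1 ++ [String.mk (PySem.Chars.strip r.2)] else r.1) =
    parts ++ finishP (match segsS l depth with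
                      | hd :: t => (current ++ hd) :: t
                      | [] => [current]) := by
  induction l generalizing parts current depth with
  | nil =>
    simp only [ndLoopA, segsS, List.append_nil, finishP]
    by_cases h : PySem.Chars.strip current = [] <;> simp [h]
  | cons c rest ih =>
    simp only [ndLoopA, segsS]
    by_cases hsep : (c == '/' && ((if c == '[' then depth + 1 else if c == ']' then depth - 1 else depth) == 0)) = true
    · simp only [hsep, if_pos]
      rw [ih]
      have hne := segsS_ne_nil rest (if c == '[' then depth + 1 else if c == ']' then depth - 1 else depth)
      cases hsn : segsS rest (if c == '[' then depth + 1 else if c == ']' then depth - 1 else depth) with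
      | nil => exact absurd hsn hne
      | cons hd t =>
        simp [finishP, List.append_assoc]
    · simp only [hsep, Bool.false_eq_true, if_false]
      rw [ih]
      have hne := segsS_ne_nil rest (if c == '[' then depth + 1 else if c == ']' then depth - 1 else depth)
      cases hsn : segsS rest (if c == '[' then depth + 1 else if c == ']' then depth - 1 else depth) with
      | nil => exact absurd hsn hne
      | cons hd t => simp

-- ===== VERDICT (by name: the statement is the Claim_ definition above) =====
theorem normalize_diplotype_spec : Claim_equal_normalize_diplotype := by
  intro diplotype _
  unfold Spec_normalize_diplotype normalize_diplotype normalize_diplotype_alt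
  by_cases hguard : (diplotype == "" || PySem.Str.lower diplotype == "unknown" ||
      PySem.Str.lower diplotype == "no call" || PySem.Str.lower diplotype == "n/a" ||
      PySem.Str.lower diplotype == "") = true
  · simp only [hguard, if_true]
  · simp only [hguard, Bool.false_eq_true, if_false]
    set dl := (PySem.Str.strip diplotype).toList with hdl
    have hA := loopA_eq dl [] [] 0
    have hglue : (match segsS dl 0 with
                  | hd :: t => (([] : List Char) ++ hd) :: t
                  | [] => [([] : List Char)]) = segsS dl 0 := by
      have hne := segsS_ne_nil dl 0
      cases hsn : segsS dl 0 with
      | nil => exact absurd hsn hne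
      | cons hd t => simp
    rw [hglue] at hA
    simp only [List.nil_append] at hA
    have hB : ndBuild dl (ndCuts dl 0 0) 0 = finishP (segsS dl 0) := by
      rw [ndBuild_eq dl _ 0 le_rfl (fun j hj => ndCuts_ge dl 0 0 j hj) (ndCuts_pairwise dl 0 0),
          sliceSeq_eq_segsS dl dl 0 0 le_rfl (by simp)]
    rcases hp : ndLoopA dl [] [] 0 with ⟨partsA, currentA⟩
    rw [hp] at hA
    simp only at hA
    dsimp only
    rw [hB, hA]
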